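-- pv_equiv track=rewrite | github.com/tachorzy/Divide-and-Conquer-Challenge | main.py | findMaxDifference
-- ===== SOURCE A (Python) =====
-- def findMaxDifference(arr: list, left, right):
--     if left >= right:
--         return 0
--
--     mid = (left + right)//2
--
--     leftArray = findMaxDifference(arr, left, mid)
--     rightArray = findMaxDifference(arr, mid+1, right)
--
--     diff = max(arr[mid+1:]) - min(arr[left:mid+1])
--     temp = max(max(leftArray, rightArray), diff)
--     return temp
-- ===== SOURCE B (Python) =====
-- def findMaxDifference(arr: list, left, right):
--     if left >= right:
--         return 0
--     # suffix maxima: suf[i] = max(arr[i:])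
--     suf = []
--     running = None
--     for x in reversed(arr):
--         running = x if running is None else max(running, x)
--         suf.append(running)
--     suf.reverse()
--     best = 0
--     premin = arr[left]
--     for m in range(left, right):
--         premin = min(premin, arr[m])
--         cand = suf[m + 1] - premin
--         if cand > best:
--             best = cand
--     return best
-- ===== Notes on version B (the rewrite author's own statement) =====
-- stated objective: faster
-- what changed: Replaced the divide-and-conquer recursion, whose every node rescans array slices with max()/min(), by a single forward pass over a precomputed suffix-maxima list with a running prefix minimum.
-- outside the precondition, e.g. on findMaxDifference([1, 2, 3], -2, -1): A returns 1, B returns 1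
import Mathlib
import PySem

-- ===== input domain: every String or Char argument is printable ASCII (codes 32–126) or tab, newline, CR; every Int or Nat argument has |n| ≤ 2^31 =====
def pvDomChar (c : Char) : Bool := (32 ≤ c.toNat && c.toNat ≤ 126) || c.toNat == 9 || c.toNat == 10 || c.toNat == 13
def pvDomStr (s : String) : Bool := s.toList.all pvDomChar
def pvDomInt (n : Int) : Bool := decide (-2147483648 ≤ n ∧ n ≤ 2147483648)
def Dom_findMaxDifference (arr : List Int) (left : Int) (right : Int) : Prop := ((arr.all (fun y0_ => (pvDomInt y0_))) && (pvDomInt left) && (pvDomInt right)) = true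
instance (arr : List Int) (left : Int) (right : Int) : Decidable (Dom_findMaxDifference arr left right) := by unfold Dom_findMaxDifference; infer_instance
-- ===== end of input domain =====

-- B replaces A's divide-and-conquer (each recursion node rescans slices for max/min)
-- by a single forward pass over a precomputed suffix-maxima list with a running prefix minimum.

-- ===== PORT A =====
def findMaxDifference (arr : List Int) (left : Int) (right : Int) : Int :=
  if _h : left ≥ right then 0
  else
    let mid := PySem.Int.floordiv (left + right) 2
    let leftArray := findMaxDifference arr left mid
    let rightArray := findMaxDifference arr (mid + 1) right
    -- max()/min() raise on an empty slice; Pre_ keeps the slices nonempty, so `.getD 0` is unreachable there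
    let diff := (PySem.List.max? (PySem.List.slice arr (some (mid + 1)) none) (fun y => y)).getD 0
              - (PySem.List.min? (PySem.List.slice arr (some left) (some (mid + 1))) (fun y => y)).getD 0
    max (max leftArray rightArray) diff
termination_by (right - left).toNat
decreasing_by
  · simp only [PySem.Int.floordiv_eq_ediv_of_pos (by norm_num : (0:Int) < 2)]
    omega
  · simp only [PySem.Int.floordiv_eq_ediv_of_pos (by norm_num : (0:Int) < 2)]
    omega

-- ===== PORT B =====
def findMaxDifference_alt (arr : List Int) (left : Int) (right : Int) : Int :=
  if left ≥ right then 0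
  else
    -- suffix maxima: suf[i] = max(arr[i:])
    let suf :=
      ((arr.reverse.foldl
          (fun (acc : List Int × Option Int) x =>
            let running :=
              match acc.2 with
              | none => x
              | some r => max r x
            (acc.1 ++ [running], some running))
          ([], none)).1).reverse
    let res :=
      (PySem.List.pyRange left right 1).foldl
        (fun (st : Int × Int) m =>
          let premin := min st.2 (PySem.List.pyGetD arr m 0)
          let cand := PySem.List.pyGetD suf (m + 1) 0 - premin
          let best := if cand > st.1 then cand else st.1
          (best, premin))
        (0, PySem.List.pyGetD arr left 0)
    res.1

-- ===== PRECONDITION & SPEC =====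
-- Pre_ excludes calls with left < right whose bounds leave [0, len(arr)): there A's slicing
-- usually raises ValueError on an empty slice (always when 0 ≤ left < right and right ≥ len(arr)),
-- and a negative bound that happens to return does so by accidental negative-slice wraparound.
def Pre_findMaxDifference (arr : List Int) (left : Int) (right : Int) : Prop :=
  left ≥ right ∨ (0 ≤ left ∧ right < (arr.length : Int))
instance (arr : List Int) (left : Int) (right : Int) : Decidable (Pre_findMaxDifference arr left right) := by
  unfold Pre_findMaxDifference; infer_instance

def pvWitness_findMaxDifference : List Int × Int × Int := ([3, -1, 4, 1, 5], 0, 4)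

def Spec_findMaxDifference (arr : List Int) (left : Int) (right : Int) (out : Int) : Prop := out = findMaxDifference_alt arr left right
instance (arr : List Int) (left : Int) (right : Int) (out : Int) : Decidable (Spec_findMaxDifference arr left right out) := by unfold Spec_findMaxDifference; infer_instance

-- ===== CLAIM (what is proved, stated in full; the proofs are below) =====
def Claim_equal_findMaxDifference : Prop := ∀ (arr : List Int) (left : Int) (right : Int), Dom_findMaxDifference arr left right → Pre_findMaxDifference arr left right → Spec_findMaxDifference arr left right (findMaxDifference arr left right)

-- ===== LEMMAS AND PROOFS =====

-- max/min of a nonempty list as Python's max()/min() compute it (junk 0 on [])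
def maxOf : List Int → Int
  | [] => 0
  | x :: t => t.foldl max x

def minOf : List Int → Int
  | [] => 0
  | x :: t => t.foldl min x

-- max(arr[i:]) and min(arr[a:b+1]) on Nat indices
def sufMax (arr : List Int) (i : Nat) : Int := maxOf (arr.drop i)
def preMin (arr : List Int) (a b : Nat) : Int := minOf ((arr.drop a).take (b + 1 - a))

-- the common spec: max of 0 and all suffix-max-minus-prefix-min differences over split points in [a, b)
def Fspec (arr : List Int) (a b : Nat) : Int :=
  (List.range' a (b - a)).foldl (fun acc m => max acc (sufMax arr (m + 1) - preMin arr a m)) 0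

theorem foldl_max_pull (t : List Int) : ∀ x y : Int, t.foldl max (max x y) = max x (t.foldl max y) := by
  induction t with
  | nil => intro x y; rfl
  | cons z t ih =>
    intro x y
    simp only [List.foldl_cons, max_assoc, ih]

theorem foldl_min_pull (t : List Int) : ∀ x y : Int, t.foldl min (min x y) = min x (t.foldl min y) := by
  induction t with
  | nil => intro x y; rfl
  | cons z t ih =>
    intro x y
    simp only [List.foldl_cons, min_assoc, ih]

theorem maxOf_append (L1 L2 : List Int) (h1 : L1 ≠ []) (h2 : L2 ≠ []) :
    maxOf (L1 ++ L2) = max (maxOf L1) (maxOf L2) := by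
  rcases L1 with _ | ⟨x, t⟩
  · exact absurd rfl h1
  rcases L2 with _ | ⟨z, s⟩
  · exact absurd rfl h2
  simp only [maxOf, List.cons_append, List.foldl_append, List.foldl_cons]
  rw [foldl_max_pull s (t.foldl max x) z]

theorem minOf_append (L1 L2 : List Int) (h1 : L1 ≠ []) (h2 : L2 ≠ []) :
    minOf (L1 ++ L2) = min (minOf L1) (minOf L2) := by
  rcases L1 with _ | ⟨x, t⟩
  · exact absurd rfl h1
  rcases L2 with _ | ⟨z, s⟩
  · exact absurd rfl h2
  simp only [minOf, List.cons_append, List.foldl_append, List.foldl_cons]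
  rw [foldl_min_pull s (t.foldl min x) z]

theorem maxOf_mem (L : List Int) (h : L ≠ []) : maxOf L ∈ L := by
  rcases L with _ | ⟨x, t⟩
  · exact absurd rfl h
  simp only [maxOf]
  rcases PySem.List.foldl_max_mem t x with h' | h'
  · rw [h']; exact List.mem_cons_self
  · exact List.mem_cons_of_mem _ h'

theorem le_maxOf (L : List Int) (y : Int) (hy : y ∈ L) : y ≤ maxOf L := by
  rcases L with _ | ⟨x, t⟩
  · simp at hy
  simp only [maxOf]
  rcases List.mem_cons.1 hy with rfl | h'
  · exact (PySem.List.le_foldl_max t y).1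
  · exact (PySem.List.le_foldl_max t x).2 y h'

theorem maxOf_reverse (L : List Int) : maxOf L.reverse = maxOf L := by
  rcases L with _ | ⟨x, t⟩
  · rfl
  have hne : (x :: t) ≠ [] := by simp
  have hne' : (x :: t).reverse ≠ [] := by simp
  apply le_antisymm
  · exact le_maxOf _ _ (List.mem_reverse.1 (maxOf_mem _ hne'))
  · exact le_maxOf _ _ (List.mem_reverse.2 (maxOf_mem _ hne))

-- suffix maxima are antitone while the suffix stays nonempty
theorem sufMax_antitone (arr : List Int) (i j : Nat) (hij : i ≤ j) (hj : j < arr.length) :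
    sufMax arr j ≤ sufMax arr i := by
  rcases Nat.eq_or_lt_of_le hij with rfl | hlt
  · exact le_rfl
  · have e1 : List.drop (j - i) (List.drop i arr) = List.drop j arr := by
      rw [List.drop_drop]; congr 1; omega
    have e2 : List.drop i arr = List.take (j - i) (List.drop i arr) ++ List.drop j arr := by
      conv_lhs => rw [← List.take_append_drop (j - i) (List.drop i arr)]
      rw [e1]
    unfold sufMax
    rw [e2, maxOf_append]
    · exact le_max_right _ _
    · have : 0 < (List.take (j - i) (List.drop i arr)).length := by
        simp [List.length_take, List.length_drop]; omega
      exact List.ne_nil_of_length_pos this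
    · have : 0 < (List.drop j arr).length := by simp [List.length_drop]; omega
      exact List.ne_nil_of_length_pos this

-- splitting the prefix-min range at an inner point
theorem preMin_split (arr : List Int) (a c m : Nat) (hac : a ≤ c) (hcm : c < m) (hm : m < arr.length) :
    preMin arr a m = min (preMin arr a c) (preMin arr (c + 1) m) := by
  have h1 : (List.drop a arr).take (m + 1 - a) =
      (List.drop a arr).take (c + 1 - a) ++ ((List.drop a arr).drop (c + 1 - a)).take ((m + 1 - a) - (c + 1 - a)) := by
    rw [← List.take_add]
    congr 1
    omega
  have h2 : (List.drop a arr).drop (c + 1 - a) = List.drop (c + 1) arr := by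
    rw [List.drop_drop]; congr 1; omega
  have h3 : (m + 1 - a) - (c + 1 - a) = m + 1 - (c + 1) := by omega
  unfold preMin
  rw [h1, h2, h3, minOf_append]
  · have : 0 < ((List.drop a arr).take (c + 1 - a)).length := by
      simp [List.length_take, List.length_drop]; omega
    exact List.ne_nil_of_length_pos this
  · have : 0 < ((List.drop (c + 1) arr).take (m + 1 - (c + 1))).length := by
      simp [List.length_take, List.length_drop]; omega
    exact List.ne_nil_of_length_pos this

theorem preMin_self (arr : List Int) (b : Nat) (hb : b < arr.length) :
    preMin arr b b = arr[b] := by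
  unfold preMin
  have : (arr.drop b).take (b + 1 - b) = [arr[b]] := by
    have h1 : b + 1 - b = 1 := by omega
    rw [h1, List.take_one, List.head?_drop]
    simp [List.getElem?_eq_getElem hb]
  rw [this]; rfl

theorem preMin_succ (arr : List Int) (a b : Nat) (hab : a < b) (hb : b < arr.length) :
    preMin arr a b = min (preMin arr a (b - 1)) arr[b] := by
  have h := preMin_split arr a (b - 1) b (by omega) (by omega) hb
  have h2 : b - 1 + 1 = b := by omega
  rw [h2] at h
  rw [h, preMin_self arr b hb]

theorem foldl_max_le (g : Nat → Int) (z : Int) :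
    ∀ (L : List Nat) (init : Int), init ≤ z → (∀ m ∈ L, g m ≤ z) →
      L.foldl (fun acc m => max acc (g m)) init ≤ z := by
  intro L
  induction L with
  | nil => intro init h _; exact h
  | cons m t ih =>
    intro init h hall
    simp only [List.foldl_cons]
    exact ih _ (max_le h (hall m List.mem_cons_self)) (fun m' hm' => hall m' (List.mem_cons_of_mem _ hm'))

theorem Fspec_nonneg (arr : List Int) (a b : Nat) : 0 ≤ Fspec arr a b := by
  unfold Fspec
  exact (PySem.List.le_foldl_max_int _ _ 0).1

theorem le_Fspec (arr : List Int) (a b m : Nat) (h1 : a ≤ m) (h2 : m < b) :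
    sufMax arr (m + 1) - preMin arr a m ≤ Fspec arr a b := by
  unfold Fspec
  refine (PySem.List.le_foldl_max_int _ _ 0).2 m ?_
  rw [List.mem_range'_1]
  omega

theorem Fspec_le (arr : List Int) (a b : Nat) (z : Int) (h0 : 0 ≤ z)
    (h : ∀ m, a ≤ m → m < b → sufMax arr (m + 1) - preMin arr a m ≤ z) :
    Fspec arr a b ≤ z := by
  unfold Fspec
  apply foldl_max_le _ _ _ _ h0
  intro m hm
  rw [List.mem_range'_1] at hm
  exact h m (by omega) (by omega)

theorem Fspec_self (arr : List Int) (a : Nat) : Fspec arr a a = 0 := by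
  unfold Fspec
  simp

theorem Fspec_succ (arr : List Int) (a m : Nat) (h : a ≤ m) :
    Fspec arr a (m + 1) = max (Fspec arr a m) (sufMax arr (m + 1) - preMin arr a m) := by
  unfold Fspec
  have h1 : m + 1 - a = (m - a) + 1 := by omega
  have h2 : List.range' a ((m - a) + 1) = List.range' a (m - a) ++ [a + 1 * (m - a)] := List.range'_concat
  have h3 : a + 1 * (m - a) = m := by omega
  rw [h1, h2, h3, List.foldl_append]
  rfl

-- the mathematical core: the value of a recursion node from its children and its own difference
theorem Fsplit (arr : List Int) (a c b : Nat) (hac : a ≤ c) (hcb : c < b) (hb : b < arr.length) :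
    Fspec arr a b = max (max (Fspec arr a c) (Fspec arr (c + 1) b))
                        (sufMax arr (c + 1) - preMin arr a c) := by
  apply le_antisymm
  · apply Fspec_le
    · exact le_trans (Fspec_nonneg arr a c) (le_trans (le_max_left _ _) (le_max_left _ _))
    · intro m ham hmb
      rcases lt_trichotomy m c with hmc | rfl | hcm'
      · exact le_trans (le_Fspec arr a c m ham hmc) (le_trans (le_max_left _ _) (le_max_left _ _))
      · exact le_max_right _ _
      · have hmlen : m < arr.length := by omega
        have hmin := preMin_split arr a c m hac hcm' hmlen
        have hS : sufMax arr (m + 1) ≤ sufMax arr (c + 1) :=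
          sufMax_antitone arr (c + 1) (m + 1) (by omega) (by omega)
        rcases le_total (preMin arr a c) (preMin arr (c + 1) m) with hle | hle
        · have hmm : preMin arr a m = preMin arr a c := by rw [hmin]; exact min_eq_left hle
          refine le_trans ?_ (le_max_right _ _)
          rw [hmm]; omega
        · have hmm : preMin arr a m = preMin arr (c + 1) m := by rw [hmin]; exact min_eq_right hle
          refine le_trans ?_ (le_trans (le_max_right _ _) (le_max_left _ _))
          rw [hmm]
          exact le_Fspec arr (c + 1) b m (by omega) hmb
  · apply max_le (max_le ?_ ?_) ?_
    · exact Fspec_le arr a c _ (Fspec_nonneg arr a b)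
        (fun m h1 h2 => le_Fspec arr a b m h1 (by omega))
    · apply Fspec_le arr (c + 1) b _ (Fspec_nonneg arr a b)
      intro m h1 h2
      have hmlen : m < arr.length := by omega
      have hmin := preMin_split arr a c m hac (by omega) hmlen
      have : preMin arr a m ≤ preMin arr (c + 1) m := by rw [hmin]; exact min_le_right _ _
      have := le_Fspec arr a b m (by omega) h2
      omega
    · exact le_Fspec arr a b c hac hcb

theorem max?_getD_eq_maxOf (L : List Int) : (PySem.List.max? L (fun y => y)).getD 0 = maxOf L := by
  rcases L with _ | ⟨x, t⟩
  · rfl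
  · rw [PySem.List.max?_id_cons]; rfl

theorem min?_getD_eq_minOf (L : List Int) : (PySem.List.min? L (fun y => y)).getD 0 = minOf L := by
  rcases L with _ | ⟨x, t⟩
  · rfl
  · rw [PySem.List.min?_id_cons]; rfl

-- A's recursion computes Fspec (strong induction on the interval length)
theorem A_eq_F : ∀ (k : Nat) (arr : List Int) (l r : Int), (r - l).toNat ≤ k →
    0 ≤ l → l < r → r < (arr.length : Int) →
    findMaxDifference arr l r = Fspec arr l.toNat r.toNat := by
  intro k
  induction k with
  | zero => intro arr l r hk h0 hlr _; omega
  | succ k ih =>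
    intro arr l r hk h0 hlr hr
    rw [findMaxDifference]
    rw [dif_neg (by omega : ¬ l ≥ r)]
    simp only
    set mid := PySem.Int.floordiv (l + r) 2 with hmiddef
    have hmide : mid = (l + r) / 2 := by
      rw [hmiddef, PySem.Int.floordiv_eq_ediv_of_pos (by norm_num : (0:Int) < 2)]
    have hmid : l ≤ mid ∧ mid < r := by rw [hmide]; omega
    have hleft : findMaxDifference arr l mid = Fspec arr l.toNat mid.toNat := by
      rcases Nat.eq_or_lt_of_le (show l.toNat ≤ mid.toNat by omega) with he | hlt
      · rw [show l = mid from by omega, findMaxDifference, dif_pos (le_refl mid)]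
        exact (Fspec_self arr mid.toNat).symm
      · exact ih arr l mid (by omega) h0 (by omega) (by omega)
    have hright : findMaxDifference arr (mid + 1) r = Fspec arr (mid + 1).toNat r.toNat := by
      rcases Nat.eq_or_lt_of_le (show (mid + 1).toNat ≤ r.toNat by omega) with he | hlt
      · rw [show mid + 1 = r from by omega, findMaxDifference, dif_pos (le_refl r)]
        exact (Fspec_self arr r.toNat).symm
      · exact ih arr (mid + 1) r (by omega) (by omega) (by omega) hr
    rw [hleft, hright]
    rw [PySem.List.slice_from arr (by omega : (0:Int) ≤ mid + 1)]
    rw [PySem.List.slice_toNat arr h0 (by omega : (0:Int) ≤ mid + 1)]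
    rw [max?_getD_eq_maxOf, min?_getD_eq_minOf]
    have e1 : (mid + 1).toNat = mid.toNat + 1 := by omega
    rw [e1]
    rw [Fsplit arr l.toNat mid.toNat r.toNat (by omega) (by omega) (by omega)]
    rfl

theorem ite_gt_eq_max (b c : Int) : (if c > b then c else b) = max b c := by
  split <;> omega

-- B's suffix-building loop produces the prefix maxima of the reversed array
theorem bfold_spec (ys : List Int) :
    ys.foldl
        (fun (acc : List Int × Option Int) x =>
          let running :=
            match acc.2 with
            | none => x
            | some r => max r x
          (acc.1 ++ [running], some running))
        ([], none)
      = ((List.range ys.length).map (fun k => maxOf (ys.take (k + 1))),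
         if ys = [] then none else some (maxOf ys)) := by
  induction ys using List.reverseRecOn with
  | nil => rfl
  | append_singleton ys z ih =>
    rw [List.foldl_append, ih]
    by_cases hys : ys = []
    · subst hys; rfl
    · simp only [if_neg hys, if_neg (show ¬(ys ++ [z] = []) by simp), List.foldl_cons,
        List.foldl_nil]
      have hrun : max (maxOf ys) z = maxOf (ys ++ [z]) := by
        rw [maxOf_append ys [z] hys (by simp)]; rfl
      rw [Prod.mk.injEq]
      constructor
      · rw [show (ys ++ [z]).length = ys.length + 1 from by simp, List.range_succ,
          List.map_append]
        congr 1
        · refine List.map_congr_left ?_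
          intro k hk
          rw [List.mem_range] at hk
          rw [List.take_append_of_le_length (by omega)]
        · simp only [List.map_cons, List.map_nil]
          rw [List.take_of_length_le (by simp), ← hrun]
      · rw [hrun]

-- hence B's suf list holds the suffix maxima of arr
theorem suf_get (arr : List Int) (i : Nat) (hi : i < arr.length) :
    PySem.List.pyGetD
        (((arr.reverse.foldl
            (fun (acc : List Int × Option Int) x =>
              let running :=
                match acc.2 with
                | none => x
                | some r => max r x
              (acc.1 ++ [running], some running))
            ([], none)).1).reverse)
        ((i : Nat) : Int) 0 = sufMax arr i := by
  rw [bfold_spec]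
  simp only [PySem.List.pyGetD_natCast]
  rw [List.getD_eq_getElem?_getD]
  rw [List.getElem?_eq_getElem (by simp; omega)]
  simp only [Option.getD_some]
  rw [List.getElem_reverse]
  rw [List.getElem_map, List.getElem_range]
  have e1 : (List.map (fun k => maxOf (List.take (k + 1) arr.reverse)) (List.range arr.reverse.length)).length - 1 - i + 1 = arr.length - i := by
    simp; omega
  rw [e1]
  have e2 : arr.reverse.take (arr.length - i) = (arr.drop i).reverse := by
    refine List.reverse_injective ?_
    rw [List.reverse_reverse, List.reverse_take, List.reverse_reverse, List.length_reverse]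
    congr 1
    omega
  rw [e2, maxOf_reverse]
  rfl

-- B's main loop invariant: best so far and the running prefix minimum
theorem Bloop (arr suf : List Int) (l : Int) (h0 : 0 ≤ l)
    (hsuf : ∀ i : Nat, i < arr.length → PySem.List.pyGetD suf ((i : Nat) : Int) 0 = sufMax arr i) :
    ∀ (d : Nat) (t : Int), t = l + 1 + (d : Int) → t < (arr.length : Int) →
      (PySem.List.pyRange l t 1).foldl
        (fun (st : Int × Int) m =>
          let premin := min st.2 (PySem.List.pyGetD arr m 0)
          let cand := PySem.List.pyGetD suf (m + 1) 0 - premin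
          let best := if cand > st.1 then cand else st.1
          (best, premin))
        (0, PySem.List.pyGetD arr l 0)
      = (Fspec arr l.toNat t.toNat, preMin arr l.toNat (t.toNat - 1)) := by
  intro d
  induction d with
  | zero =>
    intro t ht hlen
    have ht' : t = l + 1 := by omega
    subst ht'
    rw [PySem.List.pyRange_one_singleton]
    simp only [List.foldl_cons, List.foldl_nil]
    have hR1 : (l + 1).toNat = l.toNat + 1 := by omega
    rw [hR1, show l.toNat + 1 - 1 = l.toNat from by omega]
    have hget : PySem.List.pyGetD arr l 0 = arr[l.toNat] := by
      rw [PySem.List.pyGetD_eq_getElem arr 0 h0 (by omega)]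
    rw [hget]
    have hcast : l + 1 = ((l.toNat + 1 : Nat) : Int) := by omega
    rw [hcast, hsuf (l.toNat + 1) (by omega)]
    rw [Fspec_succ arr l.toNat l.toNat le_rfl, Fspec_self]
    rw [preMin_self arr l.toNat (by omega)]
    simp only [min_self]
    rw [ite_gt_eq_max]
  | succ d ih =>
    intro t ht hlen
    have hsp := PySem.List.pyRange_one_succ_right (a := l) (b := t - 1) (by omega)
    rw [show t - 1 + 1 = t from by omega] at hsp
    rw [hsp, List.foldl_append, ih (t - 1) (by omega) (by omega)]
    simp only [List.foldl_cons, List.foldl_nil]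
    have hti : (t - 1).toNat = t.toNat - 1 := by omega
    rw [hti]
    have hget : PySem.List.pyGetD arr (t - 1) 0 = arr[t.toNat - 1] := by
      rw [PySem.List.pyGetD_eq_getElem arr 0 (by omega) (by omega)]
      congr 1
      try omega
    rw [hget]
    rw [← preMin_succ arr l.toNat (t.toNat - 1) (by omega) (by omega)]
    have hcast : t - 1 + 1 = ((t.toNat : Nat) : Int) := by omega
    rw [hcast, hsuf t.toNat (by omega)]
    rw [ite_gt_eq_max]
    have hF := Fspec_succ arr l.toNat (t.toNat - 1) (by omega)
    rw [show t.toNat - 1 + 1 = t.toNat from by omega] at hF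
    rw [hF]

theorem B_eq_F (arr : List Int) (l r : Int) (h0 : 0 ≤ l) (hlr : l < r) (hr : r < (arr.length : Int)) :
    findMaxDifference_alt arr l r = Fspec arr l.toNat r.toNat := by
  rw [findMaxDifference_alt, if_neg (by omega : ¬ l ≥ r)]
  exact congrArg Prod.fst
    (Bloop arr _ l h0 (fun i hi => suf_get arr i hi) (r - (l + 1)).toNat r (by omega) hr)

-- ===== VERDICT (by name: the statement is the Claim_ definition above) =====
theorem findMaxDifference_spec : Claim_equal_findMaxDifference := by
  intro arr l r _ hpre
  unfold Spec_findMaxDifference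
  by_cases h : l ≥ r
  · rw [findMaxDifference, findMaxDifference_alt]
    simp [h]
  · rcases hpre with hpre | ⟨h0, hr⟩
    · exact absurd hpre h
    · rw [A_eq_F (r - l).toNat arr l r le_rfl h0 (by omega) hr,
        B_eq_F arr l r h0 (by omega) hr]
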